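-- pv_equiv track=rewrite | github.com/SNE-Labs/SNE-Radar | backend/app/services/motor/multi_timeframe.py | gerar_resumo_mtf
-- ===== SOURCE A (Python) =====
-- def gerar_resumo_mtf(resultados):
--     """Gera resumo da análise multi-TF"""
--     try:
--         if not resultados:
--             return "Sem dados"
--
--         # Verificar alinhamento
--         tendencias = [r.get('tendencia') for r in resultados.values() if 'tendencia' in r]
--
--         if all(t == 'ALTA' for t in tendencias):
--             return f"✅ Todos {len(tendencias)} TFs confirmam ALTA"
--         elif all(t == 'BAIXA' for t in tendencias):
--             return f"✅ Todos {len(tendencias)} TFs confirmam BAIXA"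
--         else:
--             altas = tendencias.count('ALTA')
--             baixas = tendencias.count('BAIXA')
--             if altas > baixas:
--                 return f"⚠️ {altas}/{len(tendencias)} TFs em ALTA (divergência)"
--             elif baixas > altas:
--                 return f"⚠️ {baixas}/{len(tendencias)} TFs em BAIXA (divergência)"
--             else:
--                 return f"❌ Timeframes divergentes (sem consenso)"
--
--     except:
--         return "Erro no resumo"
-- ===== SOURCE B (Python) =====
-- def gerar_resumo_mtf(resultados):
--     """Gera resumo da análise multi-TF (uma única passagem de contagem)"""
--     try:
--         if not resultados:
--             return "Sem dados"
--
--         total = altas = baixas = 0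
--         for r in resultados.values():
--             if 'tendencia' in r:
--                 total += 1
--                 t = r['tendencia']
--                 if t == 'ALTA':
--                     altas += 1
--                 elif t == 'BAIXA':
--                     baixas += 1
--
--         if altas == total:
--             return f"✅ Todos {total} TFs confirmam ALTA"
--         elif baixas == total:
--             return f"✅ Todos {total} TFs confirmam BAIXA"
--         elif altas > baixas:
--             return f"⚠️ {altas}/{total} TFs em ALTA (divergência)"
--         elif baixas > altas:
--             return f"⚠️ {baixas}/{total} TFs em BAIXA (divergência)"
--         else:
--             return f"❌ Timeframes divergentes (sem consenso)"
--     except: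
--         return "Erro no resumo"
-- ===== Notes on version B (the rewrite author's own statement) =====
-- stated objective: alternative
-- what changed: A builds the list of trend labels and then scans it up to five times (two all() scans plus two count() calls plus len); B makes a single pass over resultados.values() carrying three counters (total, altas, baixas) and decides with flat comparisons, where altas == total first also reproduces A's all()-on-empty ALTA message.
import Mathlib
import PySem

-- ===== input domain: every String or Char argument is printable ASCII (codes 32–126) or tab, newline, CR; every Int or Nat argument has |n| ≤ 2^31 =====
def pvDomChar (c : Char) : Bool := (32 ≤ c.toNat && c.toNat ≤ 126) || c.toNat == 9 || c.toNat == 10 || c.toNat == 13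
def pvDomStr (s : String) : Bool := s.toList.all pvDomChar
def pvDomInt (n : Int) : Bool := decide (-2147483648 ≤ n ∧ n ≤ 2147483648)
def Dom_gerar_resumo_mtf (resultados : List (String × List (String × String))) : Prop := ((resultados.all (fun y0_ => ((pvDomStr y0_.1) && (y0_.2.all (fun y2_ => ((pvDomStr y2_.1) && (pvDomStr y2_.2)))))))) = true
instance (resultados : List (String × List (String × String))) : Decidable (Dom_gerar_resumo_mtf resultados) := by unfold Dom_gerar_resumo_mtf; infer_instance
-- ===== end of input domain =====

-- B replaces A's comprehension + two all() scans + two count() passes by a single counting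
-- pass over the values with flat comparisons of the three counters (alternative decomposition).


-- ===== PORT A =====
-- The Python argument is a dict[str, dict[str, str]]; the association lists are read through
-- PySem.Dict.ofList so that duplicate keys overwrite exactly as in a Python dict.
-- 'if not resultados' is exact as resultados.isEmpty (the dict built from the list is empty
-- iff the list is empty).  The comprehension "[r.get('tendencia') for r in … if 'tendencia' in r]"
-- is ported with the guard as a filter and the lookup as get? (guaranteed some by the guard),
-- so tendencias : List (Option String) and 'ALTA' becomes (some "ALTA").  The try/except is
-- unreachable on well-typed input and is not ported.
def gerar_resumo_mtf (resultados : List (String × List (String × String))) : String :=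
  if resultados.isEmpty then "Sem dados"
  else
    let tendencias : List (Option String) :=
      (((PySem.Dict.ofList resultados).values.filter
          (fun r => (PySem.Dict.ofList r).contains "tendencia")).map
        (fun r => (PySem.Dict.ofList r).get? "tendencia"))
    if tendencias.all (fun t => t == some "ALTA") then
      "✅ Todos " ++ PySem.Int.toStr (tendencias.length : Int) ++ " TFs confirmam ALTA"
    else if tendencias.all (fun t => t == some "BAIXA") then
      "✅ Todos " ++ PySem.Int.toStr (tendencias.length : Int) ++ " TFs confirmam BAIXA"
    else
      let altas : Int := (tendencias.count (some "ALTA") : Int)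
      let baixas : Int := (tendencias.count (some "BAIXA") : Int)
      if altas > baixas then
        "⚠️ " ++ PySem.Int.toStr altas ++ "/" ++ PySem.Int.toStr (tendencias.length : Int) ++ " TFs em ALTA (divergência)"
      else if baixas > altas then
        "⚠️ " ++ PySem.Int.toStr baixas ++ "/" ++ PySem.Int.toStr (tendencias.length : Int) ++ " TFs em BAIXA (divergência)"
      else
        "❌ Timeframes divergentes (sem consenso)"

-- ===== PORT B =====
-- One fold over the dict's values carrying (total, altas, baixas); r['tendencia'] under the
-- ''tendencia' in r' guard is the get? match (some = key present).  Flat comparisons afterwards.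
def gerar_resumo_mtf_alt (resultados : List (String × List (String × String))) : String :=
  if resultados.isEmpty then "Sem dados"
  else
    let s : Int × Int × Int :=
      (PySem.Dict.ofList resultados).values.foldl
        (fun (s : Int × Int × Int) r =>
          match (PySem.Dict.ofList r).get? "tendencia" with
          | none => s
          | some t =>
            (s.1 + 1,
             (if t = "ALTA" then s.2.1 + 1 else s.2.1),
             (if t ≠ "ALTA" ∧ t = "BAIXA" then s.2.2 + 1 else s.2.2)))
        (0, 0, 0)
    let total := s.1; let altas := s.2.1; let baixas := s.2.2
    if altas = total then
      "✅ Todos " ++ PySem.Int.toStr total ++ " TFs confirmam ALTA"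
    else if baixas = total then
      "✅ Todos " ++ PySem.Int.toStr total ++ " TFs confirmam BAIXA"
    else if altas > baixas then
      "⚠️ " ++ PySem.Int.toStr altas ++ "/" ++ PySem.Int.toStr total ++ " TFs em ALTA (divergência)"
    else if baixas > altas then
      "⚠️ " ++ PySem.Int.toStr baixas ++ "/" ++ PySem.Int.toStr total ++ " TFs em BAIXA (divergência)"
    else
      "❌ Timeframes divergentes (sem consenso)"

-- ===== PRECONDITION & SPEC =====
def Spec_gerar_resumo_mtf (resultados : List (String × List (String × String))) (out : String) : Prop := out = gerar_resumo_mtf_alt resultados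
instance (resultados : List (String × List (String × String))) (out : String) : Decidable (Spec_gerar_resumo_mtf resultados out) := by unfold Spec_gerar_resumo_mtf; infer_instance

-- ===== CLAIM (what is proved, stated in full; the proofs are below) =====
def Claim_equal_gerar_resumo_mtf : Prop := ∀ (resultados : List (String × List (String × String))), Dom_gerar_resumo_mtf resultados → Spec_gerar_resumo_mtf resultados (gerar_resumo_mtf resultados)

-- ===== LEMMAS AND PROOFS =====

-- B's counting fold, run from any start, adds the length and the two counts of A's tendencias list.
theorem pv_fold_counts (L : List (List (String × String))) (a b c : Int) :
    L.foldl
        (fun (s : Int × Int × Int) r =>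
          match (PySem.Dict.ofList r).get? "tendencia" with
          | none => s
          | some t =>
            (s.1 + 1,
             (if t = "ALTA" then s.2.1 + 1 else s.2.1),
             (if t ≠ "ALTA" ∧ t = "BAIXA" then s.2.2 + 1 else s.2.2)))
        (a, b, c)
    = (a + (((L.filter (fun r => (PySem.Dict.ofList r).contains "tendencia")).map
              (fun r => (PySem.Dict.ofList r).get? "tendencia")).length : Int),
       b + (((L.filter (fun r => (PySem.Dict.ofList r).contains "tendencia")).map
              (fun r => (PySem.Dict.ofList r).get? "tendencia")).count (some "ALTA") : Int),
       c + (((L.filter (fun r => (PySem.Dict.ofList r).contains "tendencia")).map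
              (fun r => (PySem.Dict.ofList r).get? "tendencia")).count (some "BAIXA") : Int)) := by
  induction L generalizing a b c with
  | nil => simp
  | cons r L ih =>
    have hc : (PySem.Dict.ofList r).contains "tendencia"
        = ((PySem.Dict.ofList r).get? "tendencia").isSome :=
      PySem.Dict.contains_eq_isSome_get? _ _
    cases hg : (PySem.Dict.ofList r).get? "tendencia" with
    | none =>
      simp only [List.foldl_cons, hg, List.filter_cons, hc, Option.isSome_none]
      simpa using ih a b c
    | some t =>
      simp only [List.foldl_cons, hg, List.filter_cons, hc, Option.isSome_some]
      rw [ih]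
      by_cases hA : t = "ALTA" <;> by_cases hB : t = "BAIXA" <;>
        simp_all <;> ring_nf <;> simp

theorem pv_all_iff_count (T : List (Option String)) (v : Option String) :
    (T.all (fun t => t == v) = true) ↔ T.count v = T.length := by
  rw [List.all_eq_true, List.count_eq_length]
  constructor
  · intro h b hb; exact ((beq_iff_eq).mp (h b hb)).symm
  · intro h b hb; exact (beq_iff_eq).mpr (h b hb).symm

-- ===== VERDICT (by name: the statement is the Claim_ definition above) =====
theorem gerar_resumo_mtf_spec : Claim_equal_gerar_resumo_mtf := by
  intro resultados _
  unfold Spec_gerar_resumo_mtf gerar_resumo_mtf gerar_resumo_mtf_alt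
  by_cases he : resultados.isEmpty
  · simp [he]
  · simp only [he, Bool.false_eq_true, if_false]
    rw [pv_fold_counts]
    set T := (((PySem.Dict.ofList resultados).values.filter
        (fun r => (PySem.Dict.ofList r).contains "tendencia")).map
      (fun r => (PySem.Dict.ofList r).get? "tendencia")) with hT
    simp only [zero_add]
    have hA := pv_all_iff_count T (some "ALTA")
    have hB := pv_all_iff_count T (some "BAIXA")
    have hle' : T.count (some "ALTA") ≤ T.length := List.count_le_length
    have hle'' : T.count (some "BAIXA") ≤ T.length := List.count_le_length
    by_cases h1 : T.all (fun t => t == some "ALTA") = true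
    · have := hA.mp h1
      simp [h1, this]
    · have hne : ¬ ((T.count (some "ALTA") : Int) = (T.length : Int)) := by
        intro h; exact h1 (hA.mpr (by exact_mod_cast h))
      by_cases h2 : T.all (fun t => t == some "BAIXA") = true
      · have := hB.mp h2
        simp [h1, h2, hne, this]
      · have hne2 : ¬ ((T.count (some "BAIXA") : Int) = (T.length : Int)) := by
          intro h; exact h2 (hB.mpr (by exact_mod_cast h))
        simp [h1, h2, hne, hne2]
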